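-- pv_equiv track=rewrite | github.com/internet-sicherheit/Understanding-Regional-Filter-Lists-Efficacy-and-Impact- | 04_Plots_and_Statistics/Filterlist/filter_list_plots.py | determine_rule_occurrence
-- ===== SOURCE A (Python) =====
-- def determine_rule_occurrence(rule_dict):
--     occurrences = dict()
--
--     # Count the occurrence of each rule
--     for rules_in_list in rule_dict.values():
--         for rule in rules_in_list:
--             if rule in occurrences:
--                 occurrences[rule] += 1
--             else:
--                 occurrences[rule] = 1
--
--     # Sort the occurrences
--     sorted_occurrences = sorted(occurrences.values(), reverse=True)
--
--     return sorted_occurrences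
-- ===== SOURCE B (Python) =====
-- def determine_rule_occurrence(rule_dict):
--     # Sort the flattened rules, then read each count off as a run length.
--     rules = sorted(r for rules_in_list in rule_dict.values() for r in rules_in_list)
--     counts = []
--     prev = None
--     run = 0
--     for r in rules:
--         if r == prev:
--             run += 1
--         else:
--             if run:
--                 counts.append(run)
--             prev = r
--             run = 1
--     if run:
--         counts.append(run)
--     counts.sort(reverse=True)
--     return counts
-- ===== Notes on version B (the rewrite author's own statement) =====
-- stated objective: alternative
-- what changed: Replaces the hash-map counting pass (dict of per-rule counters, then sort the values) by sort-then-group: flatten all rule lists, sort the flattened list once, read each rule's count off as a run length, and sort the run lengths descending.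
import Mathlib
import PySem

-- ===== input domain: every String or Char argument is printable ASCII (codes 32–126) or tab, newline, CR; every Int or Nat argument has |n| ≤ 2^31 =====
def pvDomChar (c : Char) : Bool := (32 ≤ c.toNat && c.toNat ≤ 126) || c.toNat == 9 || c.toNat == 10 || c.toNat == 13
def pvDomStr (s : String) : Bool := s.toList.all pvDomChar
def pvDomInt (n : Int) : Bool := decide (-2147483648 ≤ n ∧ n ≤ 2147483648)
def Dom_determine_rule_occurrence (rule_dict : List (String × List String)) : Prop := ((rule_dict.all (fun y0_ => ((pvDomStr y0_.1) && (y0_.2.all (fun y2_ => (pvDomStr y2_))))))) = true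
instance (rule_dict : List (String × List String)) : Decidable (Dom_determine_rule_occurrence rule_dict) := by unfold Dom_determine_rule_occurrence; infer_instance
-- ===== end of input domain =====

-- B counts rule occurrences by sorting the flattened rule lists and reading each count off as a
-- run length, instead of A's dict-based counting; same descending count list (objective: alternative).

-- ===== PORT A =====
-- loop body: 'if rule in occurrences: occurrences[rule] += 1 else: occurrences[rule] = 1'
def cntStep (d : PySem.Dict String Int) (rule : String) : PySem.Dict String Int :=
  if d.contains rule then d.insert rule (d.getD rule 0 + 1) else d.insert rule 1

def determine_rule_occurrence (rule_dict : List (String × List String)) : List Int :=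
  let occurrences := rule_dict.foldl (fun d p => p.2.foldl cntStep d) PySem.Dict.empty
  PySem.List.sorted occurrences.values (fun x => x) true

-- ===== PORT B =====
-- loop body of Source B's run-length loop; state = (counts, prev, run)
def rlStep (s : List Int × Option String × Int) (r : String) : List Int × Option String × Int :=
  if some r = s.2.1 then (s.1, s.2.1, s.2.2 + 1)
  else ((if s.2.2 ≠ 0 then s.1 ++ [s.2.2] else s.1), some r, 1)

def determine_rule_occurrence_alt (rule_dict : List (String × List String)) : List Int :=
  let rules := PySem.List.sorted (rule_dict.flatMap (fun p => p.2)) (fun x => x) false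
  let st := rules.foldl rlStep ([], none, 0)
  let counts := if st.2.2 ≠ 0 then st.1 ++ [st.2.2] else st.1
  PySem.List.sorted counts (fun x => x) true

-- ===== PRECONDITION & SPEC =====
def Spec_determine_rule_occurrence (rule_dict : List (String × List String)) (out : List Int) : Prop := out = determine_rule_occurrence_alt rule_dict
instance (rule_dict : List (String × List String)) (out : List Int) : Decidable (Spec_determine_rule_occurrence rule_dict out) := by unfold Spec_determine_rule_occurrence; infer_instance

-- ===== CLAIM (what is proved, stated in full; the proofs are below) =====
def Claim_equal_determine_rule_occurrence : Prop := ∀ (rule_dict : List (String × List String)), Dom_determine_rule_occurrence rule_dict → Spec_determine_rule_occurrence rule_dict (determine_rule_occurrence rule_dict)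

-- ===== LEMMAS AND PROOFS =====

lemma cntStep_eq (d : PySem.Dict String Int) (r : String) :
    cntStep d r = d.insert r (d.getD r 0 + 1) := by
  unfold cntStep
  by_cases h : d.contains r = true
  · simp [h]
  · simp only [Bool.not_eq_true] at h
    rw [if_neg (by simp [h]), PySem.Dict.getD_of_not_contains (h := h)]; norm_num

-- A's two nested counting loops build Counter(flattened rules)
lemma occurrences_eq_counter (rule_dict : List (String × List String)) :
    rule_dict.foldl (fun d p => p.2.foldl cntStep d) PySem.Dict.empty
      = PySem.Dict.counter (rule_dict.flatMap (fun p => p.2)) := by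
  rw [← PySem.Dict.foldl_insert_getD_add_one_eq_counter, List.foldl_flatMap]
  simp only [funext fun d => funext fun r => cntStep_eq d r]

-- B's run-length fold over one constant run, starting inside the run
lemma rl_replicate (n : Nat) (acc : List Int) (k : String) (run : Int) :
    (List.replicate n k).foldl rlStep (acc, some k, run) = (acc, some k, run + n) := by
  induction n generalizing run with
  | zero => simp
  | succ m ih =>
    rw [List.replicate_succ, List.foldl_cons]
    show (List.replicate m k).foldl rlStep (rlStep (acc, some k, run) k) = _
    rw [show rlStep (acc, some k, run) k = (acc, some k, run + 1) by simp [rlStep]]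
    rw [ih]
    congr 2
    push_cast
    ring

-- the final flush 'if run: counts.append(run)'
def rlFlush (s : List Int × Option String × Int) : List Int :=
  if s.2.2 ≠ 0 then s.1 ++ [s.2.2] else s.1

-- B's run-length loop over a list of strictly increasing runs yields the run lengths
lemma rl_groups (ds : List String) (c : String → Nat) (acc : List Int) (prev : Option String) (run : Int)
    (hsort : ds.Pairwise (· < ·)) (hpos : ∀ k ∈ ds, 0 < c k) (hprev : ∀ k ∈ ds, prev ≠ some k) :
    rlFlush ((ds.flatMap (fun k => List.replicate (c k) k)).foldl rlStep (acc, prev, run))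
      = (if run ≠ 0 then acc ++ [run] else acc) ++ ds.map (fun k => (c k : Int)) := by
  induction ds generalizing acc prev run with
  | nil => simp [rlFlush]
  | cons k ds ih =>
    rw [List.flatMap_cons, List.foldl_append]
    obtain ⟨m, hm⟩ : ∃ m, c k = m + 1 :=
      ⟨c k - 1, by have := hpos k (by simp); omega⟩
    rw [hm, List.replicate_succ, List.foldl_cons]
    have hstep : rlStep (acc, prev, run) k
        = ((if run ≠ 0 then acc ++ [run] else acc), some k, 1) := by
      have : ¬ (some k = prev) := fun h => hprev k (by simp) h.symm
      simp [rlStep, this]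
    rw [hstep, rl_replicate]
    rw [ih _ _ _ (hsort.sublist (List.sublist_cons_self _ _))
        (fun x hx => hpos x (by simp [hx]))
        (fun x hx h => by
          have := (List.pairwise_cons.mp hsort).1 x hx
          exact absurd (Option.some.inj h) this.ne )]
    rw [if_pos (by positivity)]
    have : (1 : Int) + m = ((c k : Nat) : Int) := by rw [hm]; push_cast; ring
    rw [this]
    simp [List.append_assoc]

lemma count_flatMap_replicate (ds : List String) (hnd : ds.Nodup) (c : String → Nat) (a : String) :
    (ds.flatMap (fun k => List.replicate (c k) k)).count a = if a ∈ ds then c a else 0 := by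
  induction ds with
  | nil => simp
  | cons k ds ih =>
    rw [List.flatMap_cons, List.count_append, List.count_replicate,
        ih (List.nodup_cons.mp hnd).2]
    by_cases hak : a = k
    · subst hak
      simp [(List.nodup_cons.mp hnd).1]
    · simp [hak, Ne.symm hak]

lemma pairwise_flatMap_replicate (ds : List String) (c : String → Nat)
    (hsort : ds.Pairwise (· < ·)) :
    (ds.flatMap (fun k => List.replicate (c k) k)).Pairwise (· ≤ ·) := by
  induction ds with
  | nil => simp
  | cons k ds ih =>
    rw [List.flatMap_cons, List.pairwise_append]
    refine ⟨List.pairwise_replicate.mpr (Or.inr le_rfl), ih (List.pairwise_cons.mp hsort).2, ?_⟩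
    intro x hx y hy
    rw [List.eq_of_mem_replicate hx]
    obtain ⟨k', hk', hy'⟩ := List.mem_flatMap.mp hy
    rw [List.eq_of_mem_replicate hy']
    exact le_of_lt ((List.pairwise_cons.mp hsort).1 k' hk')

-- the sorted flattened list is the runs of each distinct rule, in sorted order of rules
lemma sorted_eq_groups (flat : List String) :
    PySem.List.sorted flat (fun x => x) false
      = (PySem.List.sorted (PySem.Set.ofList flat) (fun x => x) false).flatMap
          (fun k => List.replicate (flat.count k) k) := by
  have hperm : (PySem.List.sorted (PySem.Set.ofList flat) (fun x => x) false).Perm (PySem.Set.ofList flat) :=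
    PySem.List.sorted_perm _ _ _
  have hnd : (PySem.List.sorted (PySem.Set.ofList flat) (fun x => x) false).Nodup :=
    hperm.nodup_iff.mpr (PySem.Set.nodup_ofList _)
  apply PySem.List.sorted_id_eq_of_perm_of_pairwise
  · rw [List.perm_iff_count]
    intro a
    rw [count_flatMap_replicate _ hnd]
    by_cases ha : a ∈ flat
    · simp [hperm.mem_iff, PySem.Set.mem_ofList, ha]
    · simp [hperm.mem_iff, PySem.Set.mem_ofList, ha, List.count_eq_zero.mpr ha]
  · exact pairwise_flatMap_replicate _ _ (PySem.List.sorted_ofList_pairwise_lt _)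

-- reverse sorting is invariant under permutation of the input
lemma sorted_rev_eq_of_perm (xs ys : List Int) (h : xs.Perm ys) :
    PySem.List.sorted xs (fun x => x) true = PySem.List.sorted ys (fun x => x) true := by
  apply PySem.List.eq_of_perm_of_pairwise_le_of_injective (fun x : Int => -x) neg_injective
  · exact ((PySem.List.sorted_perm _ _ _).trans h).trans (PySem.List.sorted_perm _ _ _).symm
  · exact (PySem.List.sorted_pairwise_rev _ _).imp (fun h => neg_le_neg h)
  · exact (PySem.List.sorted_pairwise_rev _ _).imp (fun h => neg_le_neg h)

lemma ports_agree (rule_dict : List (String × List String)) :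
    determine_rule_occurrence rule_dict = determine_rule_occurrence_alt rule_dict := by
  unfold determine_rule_occurrence determine_rule_occurrence_alt
  set flat := rule_dict.flatMap (fun p => p.2) with hflat
  set ds := PySem.List.sorted (PySem.Set.ofList flat) (fun x => x) false with hds
  have hB : (if ((PySem.List.sorted flat (fun x => x) false).foldl rlStep ([], none, 0)).2.2 ≠ 0
        then ((PySem.List.sorted flat (fun x => x) false).foldl rlStep ([], none, 0)).1
          ++ [((PySem.List.sorted flat (fun x => x) false).foldl rlStep ([], none, 0)).2.2]
        else ((PySem.List.sorted flat (fun x => x) false).foldl rlStep ([], none, 0)).1)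
      = ds.map (fun k => (flat.count k : Int)) := by
    have := rl_groups ds (fun k => flat.count k) [] none 0
      (PySem.List.sorted_ofList_pairwise_lt _)
      (fun k hk => List.count_pos_iff.mpr (by
        have : k ∈ PySem.Set.ofList flat := (PySem.List.sorted_perm _ _ _).mem_iff.mp hk
        exact (PySem.Set.mem_ofList _ _).mp this))
      (fun k _ => by simp)
    rw [sorted_eq_groups flat, ← hds]
    simpa [rlFlush] using this
  rw [occurrences_eq_counter, ← hflat]
  show PySem.List.sorted (PySem.Dict.counter flat).values (fun x => x) true
      = PySem.List.sorted (if ((PySem.List.sorted flat (fun x => x) false).foldl rlStep ([], none, 0)).2.2 ≠ 0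
        then ((PySem.List.sorted flat (fun x => x) false).foldl rlStep ([], none, 0)).1
          ++ [((PySem.List.sorted flat (fun x => x) false).foldl rlStep ([], none, 0)).2.2]
        else ((PySem.List.sorted flat (fun x => x) false).foldl rlStep ([], none, 0)).1) (fun x => x) true
  rw [hB]
  apply sorted_rev_eq_of_perm
  have hvals : (PySem.Dict.counter flat).values
      = (PySem.Set.ofList flat).map (fun k => (flat.count k : Int)) := by
    show (PySem.Dict.counter flat).items.map (·.2) = _
    rw [PySem.Dict.items_counter]
    simp [List.map_map, Function.comp]
  rw [hvals]
  exact (List.Perm.map _ ((PySem.List.sorted_perm _ _ _).symm))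

-- ===== VERDICT (by name: the statement is the Claim_ definition above) =====
theorem determine_rule_occurrence_spec : Claim_equal_determine_rule_occurrence := by
  intro rule_dict _
  exact ports_agree rule_dict
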